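-- pv_equiv track=rewrite | github.com/camilolaiton/Graphic-Pushdown-Automaton | TuringGrafico/mainTuring.py | convertirDiccionario
-- ===== SOURCE A (Python) =====
-- def convertirDiccionario(transiciones):
-- 	estadoInicial = estadoFinal = None
-- 	contador = 0
--
-- 	for clave, valor in transiciones.items():
--
-- 		if (len(transiciones.items())-1) - (len(transiciones.items())-1) == contador:
-- 			estadoInicial = clave[0]
--
-- 		if len(transiciones.items())-1 == contador:
-- 			estadoFinal = valor[0]
--
-- 		contador = contador + 1
--
-- 	return estadoInicial, estadoFinal
-- ===== SOURCE B (Python) =====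
-- def convertirDiccionario(transiciones):
-- 	if not transiciones:
-- 		return None, None
-- 	primera_clave = next(iter(transiciones))
-- 	ultimo_valor = list(transiciones.values())[-1]
-- 	return primera_clave[0], ultimo_valor[0]
-- ===== Notes on version B (the rewrite author's own statement) =====
-- stated objective: simpler
-- what changed: B drops the counting loop and the per-item conditionals entirely and reads the two endpoints directly: the first key via next(iter(...)) and the last value via list(values())[-1].
import Mathlib
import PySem

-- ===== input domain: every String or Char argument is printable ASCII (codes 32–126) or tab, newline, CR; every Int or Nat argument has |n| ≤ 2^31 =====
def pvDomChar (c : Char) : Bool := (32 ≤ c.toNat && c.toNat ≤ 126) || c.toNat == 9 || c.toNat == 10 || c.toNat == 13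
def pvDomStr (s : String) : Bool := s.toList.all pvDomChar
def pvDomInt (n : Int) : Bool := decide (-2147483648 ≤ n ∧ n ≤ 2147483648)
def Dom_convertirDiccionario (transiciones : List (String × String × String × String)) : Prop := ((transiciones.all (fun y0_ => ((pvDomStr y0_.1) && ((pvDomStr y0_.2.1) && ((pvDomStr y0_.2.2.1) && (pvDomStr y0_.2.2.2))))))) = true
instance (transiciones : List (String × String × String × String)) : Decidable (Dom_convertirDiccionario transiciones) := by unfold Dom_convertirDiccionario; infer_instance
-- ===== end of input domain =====

-- B reads the two endpoints of the dict directly (first key's first component, last value's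
-- first component) instead of scanning all items with a counter; A never mutates its argument.
-- An entry ((k1,k2),(v1,v2)) of the dict is flattened to (k1, k2, v1, v2) here.

-- ===== PORT A =====
-- the for-loop over transiciones.items() with its counter, both ifs in source order
def convertirDiccionarioLoop (n : Int) :
    List (String × String × String × String) → Int → Option String → Option String →
    Option String × Option String
  | [], _, estadoInicial, estadoFinal => (estadoInicial, estadoFinal)
  | (k1, _, v1, _) :: rest, contador, estadoInicial, estadoFinal =>
    let estadoInicial := if (n - 1) - (n - 1) = contador then some k1 else estadoInicial
    let estadoFinal := if n - 1 = contador then some v1 else estadoFinal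
    convertirDiccionarioLoop n rest (contador + 1) estadoInicial estadoFinal

def convertirDiccionario (transiciones : List (String × String × String × String)) : Option String × Option String :=
  convertirDiccionarioLoop (transiciones.length : Int) transiciones 0 none none

-- ===== PORT B =====
def convertirDiccionario_alt (transiciones : List (String × String × String × String)) : Option String × Option String :=
  match transiciones with
  | [] => (none, none)
  | (k1, _) :: _ =>
    (some k1, (transiciones.getLast?).map (fun p => p.2.2.1))

-- ===== PRECONDITION & SPEC =====
def Spec_convertirDiccionario (transiciones : List (String × String × String × String)) (out : Option String × Option String) : Prop := out = convertirDiccionario_alt transiciones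
instance (transiciones : List (String × String × String × String)) (out : Option String × Option String) : Decidable (Spec_convertirDiccionario transiciones out) := by unfold Spec_convertirDiccionario; infer_instance

-- ===== CLAIM (what is proved, stated in full; the proofs are below) =====
def Claim_equal_convertirDiccionario : Prop := ∀ (transiciones : List (String × String × String × String)), Dom_convertirDiccionario transiciones → Spec_convertirDiccionario transiciones (convertirDiccionario transiciones)

-- ===== LEMMAS AND PROOFS =====

-- once the counter is positive, estadoInicial is never touched again
theorem loop_fst (n : Int) (l : List (String × String × String × String))
    (c : Int) (hc : 0 < c) (ei ef : Option String) :
    (convertirDiccionarioLoop n l c ei ef).1 = ei := by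
  induction l generalizing c ei ef with
  | nil => rfl
  | cons p rest ih =>
    obtain ⟨k1, k2, v1, v2⟩ := p
    simp only [convertirDiccionarioLoop]
    rw [if_neg (by omega), ih (c + 1) (by omega)]

-- if the counter accounts for the items already consumed, estadoFinal ends as the
-- last remaining value's first component (or stays put when nothing remains)
theorem loop_snd (n : Int) (l : List (String × String × String × String))
    (c : Int) (hc : c + l.length = n) (ei ef : Option String) :
    (convertirDiccionarioLoop n l c ei ef).2 =
      (match l.getLast? with
       | some p => some p.2.2.1
       | none => ef) := by
  induction l generalizing c ei ef with
  | nil => rfl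
  | cons p rest ih =>
    obtain ⟨k1, k2, v1, v2⟩ := p
    simp only [convertirDiccionarioLoop]
    cases rest with
    | nil =>
      simp only [List.length_cons, List.length_nil] at hc
      push_cast at hc
      have hcc : n - 1 = c := by omega
      simp [convertirDiccionarioLoop, hcc]
    | cons q rest' =>
      simp only [List.length_cons] at hc
      push_cast at hc
      rw [ih (c + 1) (by simp only [List.length_cons]; push_cast; omega), List.getLast?_cons_cons]
      cases h : (q :: rest').getLast? with
      | none => simp at h
      | some p => simp

-- ===== VERDICT (by name: the statement is the Claim_ definition above) =====
theorem convertirDiccionario_spec : Claim_equal_convertirDiccionario := by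
  intro transiciones _
  unfold Spec_convertirDiccionario convertirDiccionario convertirDiccionario_alt
  cases transiciones with
  | nil => rfl
  | cons p rest =>
    obtain ⟨k1, k2, v1, v2⟩ := p
    refine Prod.ext ?_ ?_
    · simp only [convertirDiccionarioLoop, sub_self, if_true]
      rw [loop_fst _ _ _ (by omega)]
    · rw [loop_snd _ _ 0 (by simp)]
      cases h : ((k1, k2, v1, v2) :: rest).getLast? with
      | none => simp at h
      | some q => simp
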